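-- pv_equiv track=rewrite | github.com/jordantrc/ms-project | analysis/sample_visualization.py | expand_bitmap
-- ===== SOURCE A (Python) =====
-- def expand_bitmap(bitmap, dims, factor):
--     '''expands the bitmap by factor'''
--     new_bitmap = []
--     for y in range(dims[0] * factor):
--         new_bitmap.append([0] * dims[1] * factor)
--
--     for y in range(dims[0]):
--         for x in range(dims[1]):
--             pixel = bitmap[y][x]
--             for y_n in range(factor * y, factor * (y + 1)):
--                 for x_n in range(factor * x, factor * (x + 1)):
--                     new_bitmap[y_n][x_n] = pixel
--
--     return new_bitmap
-- ===== SOURCE B (Python) =====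
-- def expand_bitmap(bitmap, dims, factor):
--     '''expands the bitmap by factor'''
--     new_bitmap = []
--     for y in range(dims[0]):
--         row = []
--         for x in range(dims[1]):
--             row.extend([bitmap[y][x]] * factor)
--         for _ in range(factor):
--             new_bitmap.append(list(row))
--     return new_bitmap
-- ===== Notes on version B (the rewrite author's own statement) =====
-- stated objective: simpler
-- what changed: Replaces the pre-allocated zero grid plus four nested index-assignment loops by a build-once/replicate pass: each source row is expanded once by repeating pixels, then factor fresh copies of it are appended.
-- intended difference: On degenerate inputs with dims[0] < 0 and factor < 0, A returns dims[0]*factor empty rows (an artefact of range(dims[0]*factor) going positive for two negatives), while B returns the empty bitmap, the intended result for a non-positive number of rows. — e.g. on expand_bitmap([], (-1, 0), -1): A returns [[]], B returns []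
import Mathlib
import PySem

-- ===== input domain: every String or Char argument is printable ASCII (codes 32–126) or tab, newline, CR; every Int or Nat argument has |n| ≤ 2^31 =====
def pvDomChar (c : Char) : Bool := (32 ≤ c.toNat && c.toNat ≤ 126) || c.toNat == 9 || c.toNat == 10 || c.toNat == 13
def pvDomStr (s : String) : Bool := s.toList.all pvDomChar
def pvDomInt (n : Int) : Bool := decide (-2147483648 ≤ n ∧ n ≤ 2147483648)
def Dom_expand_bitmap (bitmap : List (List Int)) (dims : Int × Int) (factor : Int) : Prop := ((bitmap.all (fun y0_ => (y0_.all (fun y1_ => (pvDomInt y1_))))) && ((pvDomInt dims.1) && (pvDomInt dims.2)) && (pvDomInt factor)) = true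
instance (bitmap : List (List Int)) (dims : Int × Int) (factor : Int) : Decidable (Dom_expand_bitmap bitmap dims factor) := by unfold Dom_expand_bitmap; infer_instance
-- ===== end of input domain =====

-- B builds the output row-by-row (expand each source row once, then append factor fresh copies)
-- instead of A's pre-allocated zero grid written cell-by-cell through four nested index loops; simpler, not faster.

-- ===== PORT A =====
def expand_bitmap (bitmap : List (List Int)) (dims : Int × Int) (factor : Int) : List (List Int) :=
  -- new_bitmap = []; for y in range(dims[0]*factor): new_bitmap.append([0]*dims[1]*factor)
  let nb0 : List (List Int) :=
    (PySem.List.pyRange 0 (dims.1 * factor) 1).foldl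
      (fun nb _ => nb ++ [PySem.List.pyRepeat (PySem.List.pyRepeat [(0 : Int)] dims.2) factor]) []
  -- for y in range(dims[0]): for x in range(dims[1]): pixel = bitmap[y][x]; nested y_n/x_n writes
  (PySem.List.pyRange 0 dims.1 1).foldl (fun nb y =>
    (PySem.List.pyRange 0 dims.2 1).foldl (fun nb x =>
      let pixel := PySem.List.pyGetD (PySem.List.pyGetD bitmap y []) x 0
      (PySem.List.pyRange (factor * y) (factor * (y + 1)) 1).foldl (fun nb yn =>
        (PySem.List.pyRange (factor * x) (factor * (x + 1)) 1).foldl (fun nb xn =>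
          PySem.List.pySetD nb yn (PySem.List.pySetD (PySem.List.pyGetD nb yn []) xn pixel)) nb) nb) nb) nb0

-- ===== PORT B =====
def expand_bitmap_alt (bitmap : List (List Int)) (dims : Int × Int) (factor : Int) : List (List Int) :=
  (PySem.List.pyRange 0 dims.1 1).foldl (fun nb y =>
    -- row = []; for x in range(dims[1]): row.extend([bitmap[y][x]] * factor)
    let row := (PySem.List.pyRange 0 dims.2 1).foldl (fun r x =>
      r ++ PySem.List.pyRepeat [PySem.List.pyGetD (PySem.List.pyGetD bitmap y []) x 0] factor) []
    -- for _ in range(factor): new_bitmap.append(list(row))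
    (PySem.List.pyRange 0 factor 1).foldl (fun nb _ => nb ++ [row]) nb) []

-- ===== PRECONDITION & SPEC =====
-- Pre_ excludes exactly the inputs where Python A raises IndexError: when both dims are
-- positive A reads bitmap[y][x] for every y < dims[0], x < dims[1], so the bitmap must be
-- at least that large.
def Pre_expand_bitmap (bitmap : List (List Int)) (dims : Int × Int) (factor : Int) : Prop :=
  (0 < dims.1 ∧ 0 < dims.2) →
    (dims.1 ≤ (bitmap.length : Int) ∧
     ∀ row ∈ bitmap.take dims.1.toNat, dims.2 ≤ (row.length : Int))
instance (bitmap : List (List Int)) (dims : Int × Int) (factor : Int) : Decidable (Pre_expand_bitmap bitmap dims factor) := by unfold Pre_expand_bitmap; infer_instance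

def pvWitness_expand_bitmap : List (List Int) × (Int × Int) × Int := ([[1, 2], [3, 4]], (2, 2), 2)

-- On degenerate inputs with dims[0] < 0 and factor < 0, A returns dims[0]*factor empty rows
-- (an artefact of range(dims[0]*factor) going positive for two negatives), while B returns the
-- empty bitmap, the intended result for a non-positive number of rows.
def D_expand_bitmap (bitmap : List (List Int)) (dims : Int × Int) (factor : Int) : Prop :=
  dims.1 < 0 ∧ factor < 0
instance (bitmap : List (List Int)) (dims : Int × Int) (factor : Int) : Decidable (D_expand_bitmap bitmap dims factor) := by unfold D_expand_bitmap; infer_instance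

def Spec_expand_bitmap (bitmap : List (List Int)) (dims : Int × Int) (factor : Int) (out : List (List Int)) : Prop := ¬ D_expand_bitmap bitmap dims factor → out = expand_bitmap_alt bitmap dims factor
instance (bitmap : List (List Int)) (dims : Int × Int) (factor : Int) (out : List (List Int)) : Decidable (Spec_expand_bitmap bitmap dims factor out) := by unfold Spec_expand_bitmap; infer_instance

def pvDiffWitness_expand_bitmap : List (List Int) × (Int × Int) × Int := ([], (-1, 0), -1)
def pvDiffWitnessOut_expand_bitmap : (List (List Int)) × (List (List Int)) := ([[]], [])

-- ===== CLAIM (what is proved, stated in full; the proofs are below) =====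
def Claim_unchanged_expand_bitmap : Prop := ∀ (bitmap : List (List Int)) (dims : Int × Int) (factor : Int), Dom_expand_bitmap bitmap dims factor → Pre_expand_bitmap bitmap dims factor → Spec_expand_bitmap bitmap dims factor (expand_bitmap bitmap dims factor)
def Claim_changed_expand_bitmap : Prop := Dom_expand_bitmap (pvDiffWitness_expand_bitmap.1) (pvDiffWitness_expand_bitmap.2.1) (pvDiffWitness_expand_bitmap.2.2) ∧ Pre_expand_bitmap (pvDiffWitness_expand_bitmap.1) (pvDiffWitness_expand_bitmap.2.1) (pvDiffWitness_expand_bitmap.2.2) ∧ D_expand_bitmap (pvDiffWitness_expand_bitmap.1) (pvDiffWitness_expand_bitmap.2.1) (pvDiffWitness_expand_bitmap.2.2) ∧ expand_bitmap (pvDiffWitness_expand_bitmap.1) (pvDiffWitness_expand_bitmap.2.1) (pvDiffWitness_expand_bitmap.2.2) = pvDiffWitnessOut_expand_bitmap.1 ∧ expand_bitmap_alt (pvDiffWitness_expand_bitmap.1) (pvDiffWitness_expand_bitmap.2.1) (pvDiffWitness_expand_bitmap.2.2) = pvDiffWitnessOut_expand_bitmap.2 ∧ pvDiffWitnessOut_expand_bitmap.1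 ≠ pvDiffWitnessOut_expand_bitmap.2
def Claim_exact_expand_bitmap : Prop := ∀ (bitmap : List (List Int)) (dims : Int × Int) (factor : Int), Dom_expand_bitmap bitmap dims factor → Pre_expand_bitmap bitmap dims factor → D_expand_bitmap bitmap dims factor → expand_bitmap bitmap dims factor ≠ expand_bitmap_alt bitmap dims factor

-- ===== LEMMAS AND PROOFS =====

-- the pixel both ports read (total form of bitmap[y][x])
def pvPix (bitmap : List (List Int)) (y x : Int) : Int :=
  PySem.List.pyGetD (PySem.List.pyGetD bitmap y []) x 0

-- the expanded source row y, over a Nat column count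
def pvRowN (bitmap : List (List Int)) (f : Int) (y : Int) (n1 : Nat) : List Int :=
  (List.range' 0 n1).flatMap (fun x => List.replicate f.toNat (pvPix bitmap y (x : Int)))

lemma pv_flatten_replicate {α : Type} (n k : Nat) (a : α) :
    (List.replicate n (List.replicate k a)).flatten = List.replicate (n * k) a := by
  induction n with
  | zero => simp
  | succ n ih => simp [List.replicate_succ, ih, List.replicate_append_replicate, Nat.succ_mul, Nat.add_comm]

lemma pv_pyRepeat_replicate (k : Nat) (f : Int) (a : Int) :
    PySem.List.pyRepeat (List.replicate k a) f = List.replicate (f.toNat * k) a := by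
  simp [PySem.List.pyRepeat, pv_flatten_replicate]

lemma pv_foldl_fixed {α β : Type} (g : α → β → α) (l : List β) (a : α)
    (h : ∀ a x, g a x = a) : l.foldl g a = a := by
  induction l generalizing a with
  | nil => rfl
  | cons x xs ih => simp [List.foldl_cons, h, ih]

lemma pv_flatMap_nil {α β : Type} (l : List α) :
    l.flatMap (fun _ => ([] : List β)) = [] := by
  induction l with
  | nil => rfl
  | cons x xs ih => simp [List.flatMap_cons, ih]

lemma pv_flatMap_const_singleton {α β : Type} (l : List α) (a : β) :
    l.flatMap (fun _ => [a]) = List.replicate l.length a := by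
  induction l <;> simp_all [List.replicate_succ]

-- A's first loop builds the zero grid
lemma a_init (d0 d1 f : Int) :
    (PySem.List.pyRange 0 (d0 * f) 1).foldl
      (fun nb _ => nb ++ [PySem.List.pyRepeat (PySem.List.pyRepeat [(0 : Int)] d1) f]) []
      = List.replicate (d0 * f).toNat (List.replicate (f.toNat * d1.toNat) (0 : Int)) := by
  rw [PySem.List.foldl_append_singleton_eq_map]
  simp [PySem.List.pyRepeat_singleton, pv_pyRepeat_replicate, List.map_const',
    PySem.List.length_pyRange_one]

-- B's result in closed form
lemma alt_closed (bitmap : List (List Int)) (dims : Int × Int) (factor : Int) :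
    expand_bitmap_alt bitmap dims factor
      = (PySem.List.pyRange 0 dims.1 1).flatMap
          (fun y => List.replicate factor.toNat
            ((PySem.List.pyRange 0 dims.2 1).flatMap
              (fun x => List.replicate factor.toNat (pvPix bitmap y x)))) := by
  unfold expand_bitmap_alt pvPix
  simp only [PySem.List.pyRepeat_singleton, PySem.List.foldl_append_eq_flatMap,
    Int.sub_zero, List.nil_append]
  simp [pv_flatMap_const_singleton, PySem.List.length_pyRange_one]

-- the x_n loop on a single row writes a block of m copies of p
lemma foldl_set_const (p z : Int) (m : Nat) :
    ∀ (a : Int) (c rest : List Int), 0 ≤ a → c.length = a.toNat →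
    (PySem.List.pyRange a (a + m) 1).foldl (fun r xn => PySem.List.pySetD r xn p)
      (c ++ List.replicate m z ++ rest)
    = c ++ List.replicate m p ++ rest := by
  induction m with
  | zero => intro a c rest ha hc; simp [PySem.List.pyRange_one_eq_nil]
  | succ m ih =>
    intro a c rest ha hc
    rw [PySem.List.pyRange_one_cons (by omega : a < a + ((m+1:Nat) : Int))]
    rw [List.foldl_cons]
    have hset : PySem.List.pySetD (c ++ List.replicate (m+1) z ++ rest) a p
        = (c ++ [p]) ++ List.replicate m z ++ rest := by
      rw [PySem.List.pySetD_of_nonneg _ _ ha]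
      rw [List.append_assoc, List.set_append]
      simp [hc, List.replicate_succ]
    rw [hset]
    have := ih (a+1) (c ++ [p]) rest (by omega) (by simp [hc]; omega)
    have harg : a + ((m+1:Nat) : Int) = (a + 1) + (m : Int) := by push_cast; ring
    rw [harg, this]
    simp [List.replicate_succ]

-- folding the per-cell write over a list of column indices modifies only row i
lemma xnfold_modify (p : Int) (xs : List Int) :
    ∀ (nb : List (List Int)) (i : Int), 0 ≤ i → i.toNat < nb.length →
    xs.foldl (fun nb xn =>
        PySem.List.pySetD nb i (PySem.List.pySetD (PySem.List.pyGetD nb i []) xn p)) nb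
    = PySem.List.pySetD nb i
        (xs.foldl (fun r xn => PySem.List.pySetD r xn p) (PySem.List.pyGetD nb i [])) := by
  induction xs with
  | nil =>
    intro nb i hi hlen
    have hi2 : i < (nb.length : Int) := by omega
    simp [PySem.List.pySetD_of_nonneg _ _ hi,
      PySem.List.pyGetD_eq_getElem _ _ hi hi2, List.set_getElem_self]
  | cons x xs ih =>
    intro nb i hi hlen
    rw [List.foldl_cons, List.foldl_cons]
    rw [ih _ i hi (by simp [PySem.List.pySetD_of_nonneg _ _ hi]; omega)]
    have hi3 : i < ((PySem.List.pySetD nb i (PySem.List.pySetD (PySem.List.pyGetD nb i []) x p)).length : Int) := by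
      simp [PySem.List.pySetD_of_nonneg _ _ hi]; omega
    rw [PySem.List.pyGetD_eq_getElem _ _ hi hi3]
    simp [PySem.List.pySetD_of_nonneg _ _ hi, List.getElem_set_self, List.set_set]

-- the y_n loop applies the same row transformation to each of the m identical rows of the block
lemma foldl_block (p : Int) (xs : List Int) (m : Nat) :
    ∀ (a : Int) (P Q : List (List Int)) (r : List Int), 0 ≤ a → P.length = a.toNat →
    (PySem.List.pyRange a (a + m) 1).foldl
      (fun nb yn => xs.foldl (fun nb xn =>
          PySem.List.pySetD nb yn (PySem.List.pySetD (PySem.List.pyGetD nb yn []) xn p)) nb)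
      (P ++ List.replicate m r ++ Q)
    = P ++ List.replicate m (xs.foldl (fun r xn => PySem.List.pySetD r xn p) r) ++ Q := by
  induction m with
  | zero => intro a P Q r ha hP; simp [PySem.List.pyRange_one_eq_nil]
  | succ m ih =>
    intro a P Q r ha hP
    rw [PySem.List.pyRange_one_cons (by omega : a < a + ((m+1:Nat) : Int))]
    rw [List.foldl_cons]
    set st := P ++ List.replicate (m+1) r ++ Q with hst
    have hlen : a.toNat < st.length := by simp [hst]; omega
    have hget : PySem.List.pyGetD st a [] = r := by
      have : a < (st.length : Int) := by omega
      rw [PySem.List.pyGetD_eq_getElem _ _ ha this]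
      simp [hst, List.getElem_append_right, hP, List.replicate_succ]
    rw [xnfold_modify p xs st a ha hlen, hget]
    set w := xs.foldl (fun r xn => PySem.List.pySetD r xn p) r with hw
    have hset : PySem.List.pySetD st a w = (P ++ [w]) ++ List.replicate m r ++ Q := by
      rw [PySem.List.pySetD_of_nonneg _ _ ha, hst]
      rw [List.append_assoc, List.set_append]
      simp [hP, List.replicate_succ]
    rw [hset]
    have harg : a + ((m+1:Nat) : Int) = (a + 1) + (m : Int) := by push_cast; ring
    rw [harg, ih (a+1) (P ++ [w]) Q r (by omega) (by simp [hP]; omega)]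
    simp [List.replicate_succ]
    exact Or.inr rfl

-- the x loop turns the m-row zero block for source row y into m copies of the expanded row
lemma xfold (bitmap : List (List Int)) (f y : Int) (hf : 0 < f) (hy : 0 ≤ y) :
    ∀ (k x0 : Nat) (P Q : List (List Int)) (c : List Int),
    P.length = (f * y).toNat → c.length = (f * (x0 : Int)).toNat →
    (PySem.List.pyRange (x0 : Int) ((x0 : Int) + (k : Int)) 1).foldl
      (fun nb x =>
        (PySem.List.pyRange (f * y) (f * (y + 1)) 1).foldl (fun nb yn =>
          (PySem.List.pyRange (f * x) (f * (x + 1)) 1).foldl (fun nb xn =>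
            PySem.List.pySetD nb yn
              (PySem.List.pySetD (PySem.List.pyGetD nb yn []) xn (pvPix bitmap y x))) nb) nb)
      (P ++ List.replicate f.toNat (c ++ List.replicate (k * f.toNat) 0) ++ Q)
    = P ++ List.replicate f.toNat
        (c ++ (List.range' x0 k).flatMap
          (fun x => List.replicate f.toNat (pvPix bitmap y (x : Int)))) ++ Q := by
  intro k
  induction k with
  | zero => intro x0 P Q c hP hc; simp [PySem.List.pyRange_one_eq_nil]
  | succ k ih =>
    intro x0 P Q c hP hc
    rw [PySem.List.pyRange_one_cons (by push_cast; omega : (x0:Int) < (x0:Int) + ((k+1:Nat) : Int))]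
    rw [List.foldl_cons]
    have hyr : f * (y + 1) = f * y + (f.toNat : Int) := by
      rw [Int.toNat_of_nonneg (le_of_lt hf)]; ring
    have hxr : f * ((x0:Int) + 1) = f * (x0:Int) + (f.toNat : Int) := by
      rw [Int.toNat_of_nonneg (le_of_lt hf)]; ring
    have hfy : (0:Int) ≤ f * y := mul_nonneg (le_of_lt hf) hy
    have hfx : (0:Int) ≤ f * (x0:Int) := mul_nonneg (le_of_lt hf) (by positivity)
    have hrow : (PySem.List.pyRange (f * (x0:Int)) (f * ((x0:Int) + 1)) 1).foldl
        (fun r xn => PySem.List.pySetD r xn (pvPix bitmap y (x0:Int)))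
        (c ++ List.replicate ((k+1) * f.toNat) (0:Int))
        = (c ++ List.replicate f.toNat (pvPix bitmap y (x0:Int))) ++ List.replicate (k * f.toNat) (0:Int) := by
      rw [hxr]
      rw [show c ++ List.replicate ((k+1) * f.toNat) (0:Int)
            = c ++ List.replicate f.toNat (0:Int) ++ List.replicate (k * f.toNat) (0:Int) by
          simp [List.append_assoc, List.replicate_append_replicate, Nat.succ_mul, Nat.add_comm]]
      rw [foldl_set_const (pvPix bitmap y (x0:Int)) 0 f.toNat (f * (x0:Int))
        c (List.replicate (k * f.toNat) 0) hfx hc]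
    have hstep : (PySem.List.pyRange (f * y) (f * (y + 1)) 1).foldl (fun nb yn =>
          (PySem.List.pyRange (f * (x0:Int)) (f * ((x0:Int) + 1)) 1).foldl (fun nb xn =>
            PySem.List.pySetD nb yn
              (PySem.List.pySetD (PySem.List.pyGetD nb yn []) xn (pvPix bitmap y (x0:Int)))) nb)
          (P ++ List.replicate f.toNat (c ++ List.replicate ((k+1) * f.toNat) 0) ++ Q)
        = P ++ List.replicate f.toNat
            ((c ++ List.replicate f.toNat (pvPix bitmap y (x0:Int))) ++ List.replicate (k * f.toNat) 0) ++ Q := by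
      rw [hyr]
      rw [foldl_block (pvPix bitmap y (x0:Int))
        (PySem.List.pyRange (f * (x0:Int)) (f * ((x0:Int) + 1)) 1) f.toNat (f * y) P Q
        (c ++ List.replicate ((k+1) * f.toNat) 0) hfy hP]
      rw [hrow]
    rw [hstep]
    have hc2 : (x0:Int) + ((k+1:Nat):Int) = (((x0+1:Nat)):Int) + (k:Int) := by push_cast; ring
    rw [hc2, show ((x0:Int)+1) = (((x0+1:Nat)):Int) by push_cast; ring]
    have hfx1 : f * (((x0+1:Nat)):Int) = f * (x0:Int) + f := by push_cast; ring
    rw [ih (x0+1) P Q (c ++ List.replicate f.toNat (pvPix bitmap y (x0:Int))) hP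
      (by simp [hc]; omega)]
    rw [List.range'_succ]
    simp [List.flatMap_cons]

-- the y loop consumes the zero grid block by block
lemma yfold (bitmap : List (List Int)) (f : Int) (hf : 0 < f) (n1 : Nat) :
    ∀ (k y0 : Nat) (P : List (List Int)),
    P.length = (f * (y0 : Int)).toNat →
    (PySem.List.pyRange (y0 : Int) ((y0 : Int) + (k : Int)) 1).foldl
      (fun nb y =>
        (PySem.List.pyRange 0 (n1 : Int) 1).foldl (fun nb x =>
          (PySem.List.pyRange (f * y) (f * (y + 1)) 1).foldl (fun nb yn =>
            (PySem.List.pyRange (f * x) (f * (x + 1)) 1).foldl (fun nb xn =>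
              PySem.List.pySetD nb yn
                (PySem.List.pySetD (PySem.List.pyGetD nb yn []) xn (pvPix bitmap y x))) nb) nb) nb)
      (P ++ List.replicate (k * f.toNat) (List.replicate (n1 * f.toNat) 0))
    = P ++ (List.range' y0 k).flatMap
        (fun y => List.replicate f.toNat (pvRowN bitmap f (y : Int) n1)) := by
  intro k
  induction k with
  | zero => intro y0 P hP; simp [PySem.List.pyRange_one_eq_nil]
  | succ k ih =>
    intro y0 P hP
    rw [PySem.List.pyRange_one_cons (by push_cast; omega : (y0:Int) < (y0:Int) + ((k+1:Nat) : Int))]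
    rw [List.foldl_cons]
    rw [show P ++ List.replicate ((k+1) * f.toNat) (List.replicate (n1 * f.toNat) (0:Int))
        = P ++ List.replicate f.toNat (List.replicate (n1 * f.toNat) 0)
            ++ List.replicate (k * f.toNat) (List.replicate (n1 * f.toNat) 0) by
      simp [List.append_assoc, List.replicate_append_replicate, Nat.succ_mul, Nat.add_comm]]
    have hx := xfold bitmap f (y0:Int) hf (by positivity) n1 0 P
      (List.replicate (k * f.toNat) (List.replicate (n1 * f.toNat) 0)) [] hP (by simp)
    simp only [Nat.cast_zero, zero_add, List.nil_append] at hx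
    rw [hx]
    rw [show (List.range' 0 n1).flatMap
          (fun x => List.replicate f.toNat (pvPix bitmap (y0:Int) (x:Int)))
        = pvRowN bitmap f (y0:Int) n1 from rfl]
    rw [show (y0:Int) + ((k+1:Nat):Int) = (((y0+1:Nat)):Int) + (k:Int) by push_cast; ring,
        show ((y0:Int)+1) = (((y0+1:Nat)):Int) by push_cast; ring]
    rw [ih (y0+1) (P ++ List.replicate f.toNat (pvRowN bitmap f (y0:Int) n1))
      (by
        simp only [List.length_append, hP, List.length_replicate]
        have h1 : f * (((y0+1:Nat)):Int) = f * (y0:Int) + f := by push_cast; ring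
        have h2 : (0:Int) ≤ f * (y0:Int) := mul_nonneg (le_of_lt hf) (by positivity)
        omega)]
    rw [List.range'_succ]
    simp [List.flatMap_cons]

lemma pv_toNat_mul (a b : Int) (hb : 0 ≤ b) : (a * b).toNat = a.toNat * b.toNat := by
  rcases le_or_gt 0 a with ha | ha
  · obtain ⟨n, rfl⟩ := Int.eq_ofNat_of_zero_le ha
    obtain ⟨m, rfl⟩ := Int.eq_ofNat_of_zero_le hb
    rw [← Int.natCast_mul, Int.toNat_natCast, Int.toNat_natCast, Int.toNat_natCast]
  · have h1 : a * b ≤ 0 := mul_nonpos_iff.mpr (Or.inr ⟨le_of_lt ha, hb⟩)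
    have h2 : a.toNat = 0 := by omega
    rw [h2, Nat.zero_mul]
    omega

lemma pv_pyRange_zero_toNat (d : Int) :
    PySem.List.pyRange 0 d 1 = PySem.List.pyRange 0 ((d.toNat : Nat) : Int) 1 := by
  rw [PySem.List.pyRange_one, PySem.List.pyRange_one]
  norm_num
  rw [show (max d 0).toNat = d.toNat by omega]

-- A's result in closed form for positive factor (any dims)
lemma a_closed_pos (bitmap : List (List Int)) (dims : Int × Int) (factor : Int)
    (hf : 0 < factor) :
    expand_bitmap bitmap dims factor
      = (List.range' 0 dims.1.toNat).flatMap
          (fun y => List.replicate factor.toNat (pvRowN bitmap factor (y : Int) dims.2.toNat)) := by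
  obtain ⟨d0, d1⟩ := dims
  unfold expand_bitmap
  dsimp only
  rw [a_init]
  have hy := yfold bitmap factor hf d1.toNat d0.toNat 0 [] (by simp)
  simp only [Nat.cast_zero, zero_add, List.nil_append] at hy
  rw [pv_pyRange_zero_toNat d0, pv_pyRange_zero_toNat d1]
  rw [show (d0 * factor).toNat = d0.toNat * factor.toNat from pv_toNat_mul _ _ (le_of_lt hf),
      show factor.toNat * d1.toNat = d1.toNat * factor.toNat from Nat.mul_comm _ _]
  simp only [pvPix] at hy
  exact hy

-- the flatMap bridge from pyRange to range'
lemma pv_flatMap_pyRange {β : Type} (n : Nat) (g : Int → List β) :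
    (PySem.List.pyRange 0 (n : Int) 1).flatMap g
      = (List.range' 0 n).flatMap (fun (k : Nat) => g (k : Int)) := by
  rw [PySem.List.pyRange_one]
  rw [show ((n : Int) - 0).toNat = n by omega]
  rw [List.flatMap_map, List.range_eq_range']
  simp

-- both sides are empty when factor is nonpositive (and dims[0] is nonnegative if factor < 0)
lemma a_empty_nonpos (bitmap : List (List Int)) (dims : Int × Int) (factor : Int)
    (hf : factor ≤ 0) (hd : dims.1 * factor ≤ 0) :
    expand_bitmap bitmap dims factor = [] := by
  obtain ⟨d0, d1⟩ := dims
  unfold expand_bitmap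
  dsimp only
  rw [PySem.List.pyRange_one_eq_nil hd, List.foldl_nil]
  apply pv_foldl_fixed
  intro nb y
  apply pv_foldl_fixed
  intro a x
  have hnil : PySem.List.pyRange (factor * y) (factor * (y + 1)) 1 = [] := by
    apply PySem.List.pyRange_one_eq_nil
    have h : factor * (y + 1) = factor * y + factor := by ring
    linarith [h]
  simp [hnil]

lemma alt_empty_nonpos (bitmap : List (List Int)) (dims : Int × Int) (factor : Int)
    (hf : factor ≤ 0) :
    expand_bitmap_alt bitmap dims factor = [] := by
  rw [alt_closed]
  have : factor.toNat = 0 := by omega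
  simp [this, pv_flatMap_nil]

-- ===== VERDICT (by name: the statement is the Claim_ definition above) =====
theorem expand_bitmap_spec : Claim_unchanged_expand_bitmap := by
  intro bitmap dims factor hdom hpre hnd
  unfold D_expand_bitmap at hnd
  rcases le_or_gt factor 0 with hf | hf
  · -- A and B both return []
    have hd : dims.1 * factor ≤ 0 := by
      rcases lt_or_ge factor 0 with hneg | hge
      · have hd0 : 0 ≤ dims.1 := by
          by_contra h
          exact hnd ⟨by omega, hneg⟩
        exact mul_nonpos_iff.mpr (Or.inl ⟨hd0, hf⟩)
      · have : factor = 0 := le_antisymm hf hge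
        simp [this]
    rw [a_empty_nonpos bitmap dims factor hf hd, alt_empty_nonpos bitmap dims factor hf]
  · -- positive factor: both equal the block closed form
    rw [a_closed_pos bitmap dims factor hf, alt_closed,
        pv_pyRange_zero_toNat dims.1, pv_pyRange_zero_toNat dims.2,
        pv_flatMap_pyRange dims.1.toNat]
    simp only [pv_flatMap_pyRange dims.2.toNat, pvRowN]
    simp [List.flatMap_assoc]

theorem expand_bitmap_changed : Claim_changed_expand_bitmap := by
  unfold Claim_changed_expand_bitmap; decide

theorem expand_bitmap_tight : Claim_exact_expand_bitmap := by
  intro bitmap dims factor hdom hpre hD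
  obtain ⟨hd0, hfneg⟩ := hD
  have hB : expand_bitmap_alt bitmap dims factor = [] :=
    alt_empty_nonpos bitmap dims factor (le_of_lt hfneg)
  have hA : expand_bitmap bitmap dims factor
      = List.replicate (dims.1 * factor).toNat
          (List.replicate (factor.toNat * dims.2.toNat) 0) := by
    obtain ⟨d0, d1⟩ := dims
    unfold expand_bitmap
    dsimp only
    rw [PySem.List.pyRange_one_eq_nil (le_of_lt hd0), List.foldl_nil, a_init]
  rw [hA, hB]
  have hpos : 0 < dims.1 * factor := mul_pos_of_neg_of_neg hd0 hfneg
  have hne : (dims.1 * factor).toNat ≠ 0 := by omega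
  intro h
  have := congrArg List.length h
  simp at this
  omega
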